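-- pv_equiv track=rewrite | github.com/electrixoul/sae_demo | neural_sae_tsne_visualize.py | create_stimulus_labels
-- ===== SOURCE A (Python) =====
-- from typing import Dict, List, Tuple
--
-- def create_stimulus_labels(labels: List[str],
--                           stimulus_types: List[str],
--                           batch_size: int) -> List[str]:
--     """为每个样本创建刺激类型标签"""
--     stimulus_labels = []
--
--     # 假设数据按刺激类型顺序排列
--     samples_per_stimulus = len(labels) // len(stimulus_types)
--
--     for i, stimulus in enumerate(stimulus_types):
--         start_idx = i * samples_per_stimulus
--         end_idx = start_idx + samples_per_stimulus
--
--         # 为该刺激类型的所有样本添加标签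
--         for j in range(start_idx, min(end_idx, len(labels))):
--             stimulus_labels.append(stimulus)
--
--     # 处理剩余样本（如果有的话）
--     while len(stimulus_labels) < len(labels):
--         stimulus_labels.append(stimulus_types[-1])
--
--     return stimulus_labels
-- ===== SOURCE B (Python) =====
-- from typing import List
--
-- def create_stimulus_labels(labels: List[str],
--                            stimulus_types: List[str],
--                            batch_size: int) -> List[str]:
--     samples_per_stimulus = len(labels) // len(stimulus_types)
--     if samples_per_stimulus == 0:
--         return [stimulus_types[-1]] * len(labels)
--     last = len(stimulus_types) - 1
--     return [stimulus_types[min(i // samples_per_stimulus, last)]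
--             for i in range(len(labels))]
-- ===== Notes on version B (the rewrite author's own statement) =====
-- stated objective: simpler
-- what changed: Replaces the block loop plus trailing while-fill with a single closed-form pass that computes each sample's label as stimulus_types[min(i // samples_per_stimulus, last)]; the division is kept so empty stimulus_types still raises ZeroDivisionError.
import Mathlib
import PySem

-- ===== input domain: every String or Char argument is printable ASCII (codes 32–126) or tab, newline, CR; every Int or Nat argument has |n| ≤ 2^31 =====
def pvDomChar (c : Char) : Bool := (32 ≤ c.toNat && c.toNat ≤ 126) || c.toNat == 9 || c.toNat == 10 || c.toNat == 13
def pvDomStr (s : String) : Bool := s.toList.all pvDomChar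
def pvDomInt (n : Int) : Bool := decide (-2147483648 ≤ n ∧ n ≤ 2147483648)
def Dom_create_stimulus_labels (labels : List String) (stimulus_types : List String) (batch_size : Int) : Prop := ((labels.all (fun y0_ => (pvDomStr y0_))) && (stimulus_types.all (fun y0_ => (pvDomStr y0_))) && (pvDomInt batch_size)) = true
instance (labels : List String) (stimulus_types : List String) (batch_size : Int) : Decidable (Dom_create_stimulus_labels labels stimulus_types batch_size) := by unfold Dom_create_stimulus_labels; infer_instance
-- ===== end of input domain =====

-- B replaces A's block loop + trailing while-fill by one closed-form pass (objective: simpler).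

-- ===== PORT A =====
-- outer loop over `enumerate(stimulus_types)`; each iteration appends `stimulus`
-- once per j in range(start_idx, min(end_idx, len(labels)))  (bounds are nonneg
-- Nats here, so `List.range' start (min end n - start)` is exactly that range)
def pvLoopA (st : List String) (i : Nat) (sps n : Nat) (acc : List String) : List String :=
  match st with
  | [] => acc
  | s :: rest =>
      pvLoopA rest (i + 1) sps n
        (acc ++ (List.range' (i * sps) (min (i * sps + sps) n - i * sps)).map (fun _ => s))

-- `while len(stimulus_labels) < len(labels): stimulus_labels.append(stimulus_types[-1])`
def pvFillA (n : Nat) (last : String) (acc : List String) : List String :=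
  if acc.length < n then pvFillA n last (acc ++ [last]) else acc
termination_by n - acc.length
decreasing_by simp; omega

def create_stimulus_labels (labels : List String) (stimulus_types : List String) (batch_size : Int) : List String :=
  -- len(labels) // len(stimulus_types): both nonneg, so Nat division is exact
  -- (Python raises ZeroDivisionError when stimulus_types = []; excluded by Pre_)
  let n := labels.length
  let sps := n / stimulus_types.length
  let acc := pvLoopA stimulus_types 0 sps n []
  pvFillA n (stimulus_types.getD (stimulus_types.length - 1) "") acc

-- ===== PORT B =====
def create_stimulus_labels_alt (labels : List String) (stimulus_types : List String) (batch_size : Int) : List String :=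
  let n := labels.length
  let sps := n / stimulus_types.length
  if sps = 0 then
    List.replicate n (stimulus_types.getD (stimulus_types.length - 1) "")
  else
    (List.range n).map (fun i => stimulus_types.getD (min (i / sps) (stimulus_types.length - 1)) "")

-- ===== PRECONDITION & SPEC =====
-- Pre_ excludes exactly stimulus_types = [], where Python A raises ZeroDivisionError.
def Pre_create_stimulus_labels (labels : List String) (stimulus_types : List String) (batch_size : Int) : Prop :=
  stimulus_types ≠ []
instance (labels : List String) (stimulus_types : List String) (batch_size : Int) : Decidable (Pre_create_stimulus_labels labels stimulus_types batch_size) := by unfold Pre_create_stimulus_labels; infer_instance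

def pvWitness_create_stimulus_labels : List String × List String × Int := (["a", "b", "c"], ["x", "y"], 4)

def Spec_create_stimulus_labels (labels : List String) (stimulus_types : List String) (batch_size : Int) (out : List String) : Prop := out = create_stimulus_labels_alt labels stimulus_types batch_size
instance (labels : List String) (stimulus_types : List String) (batch_size : Int) (out : List String) : Decidable (Spec_create_stimulus_labels labels stimulus_types batch_size out) := by unfold Spec_create_stimulus_labels; infer_instance

-- ===== CLAIM (what is proved, stated in full; the proofs are below) =====
def Claim_equal_create_stimulus_labels : Prop := ∀ (labels : List String) (stimulus_types : List String) (batch_size : Int), Dom_create_stimulus_labels labels stimulus_types batch_size → Pre_create_stimulus_labels labels stimulus_types batch_size → Spec_create_stimulus_labels labels stimulus_types batch_size (create_stimulus_labels labels stimulus_types batch_size)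

-- ===== LEMMAS AND PROOFS =====

-- A's outer loop: each block lies fully inside [0, n), so it contributes
-- exactly `sps` copies of its stimulus.
theorem pvLoopA_eq (sps n : Nat) : ∀ (st : List String) (i : Nat) (acc : List String),
    (i + st.length) * sps ≤ n →
    pvLoopA st i sps n acc = acc ++ st.flatMap (fun s => List.replicate sps s) := by
  intro st
  induction st with
  | nil => intro i acc _; simp [pvLoopA]
  | cons s rest ih =>
      intro i acc h
      have hb : i * sps + sps ≤ n := by
        have : (i + 1) * sps ≤ (i + (rest.length + 1)) * sps :=
          Nat.mul_le_mul_right _ (by omega)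
        calc i * sps + sps = (i + 1) * sps := by ring
          _ ≤ n := le_trans this (by simpa using h)
      have hmin : min (i * sps + sps) n = i * sps + sps := Nat.min_eq_left hb
      have hrange : (List.range' (i * sps) (min (i * sps + sps) n - i * sps)).map
          (fun _ => s) = List.replicate sps s := by
        rw [hmin]
        simp [List.map_const']
      rw [pvLoopA, hrange, ih (i + 1) _ (by simpa [Nat.add_comm, Nat.add_left_comm] using h)]
      simp

-- A's while-fill pads acc with copies of `last` up to length n.
theorem pvFillA_eq (n : Nat) (last : String) : ∀ (acc : List String),
    pvFillA n last acc = acc ++ List.replicate (n - acc.length) last := by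
  intro acc
  by_cases h : acc.length < n
  · rw [pvFillA]
    simp only [h, if_true]
    rw [pvFillA_eq n last (acc ++ [last])]
    have : n - acc.length = (n - (acc ++ [last]).length) + 1 := by simp; omega
    rw [this, List.replicate_succ]
    simp
  · rw [pvFillA]
    simp only [h, if_false]
    have : n - acc.length = 0 := by omega
    simp [this]
termination_by acc => n - acc.length
decreasing_by simp; omega

theorem length_flatMap_replicate (m : Nat) (st : List String) :
    (st.flatMap (fun s => List.replicate m s)).length = st.length * m := by
  induction st with
  | nil => simp
  | cons s rest ih => simp [ih]; ring

theorem getElem_flatMap_replicate (m : Nat) (hm : 0 < m) : ∀ (st : List String) (i : Nat)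
    (h : i < (st.flatMap (fun s => List.replicate m s)).length)
    (h' : i / m < st.length),
    (st.flatMap (fun s => List.replicate m s))[i] = st[i / m] := by
  intro st
  induction st with
  | nil => intro i h h'; simp at h
  | cons s rest ih =>
      intro i h h'
      simp only [List.flatMap_cons]
      by_cases hi : i < m
      · have hdiv : i / m = 0 := Nat.div_eq_of_lt hi
        rw [List.getElem_append_left (by simpa using hi)]
        simp [hdiv]
      · have hlen : (rest.flatMap (fun s => List.replicate m s)).length = rest.length * m :=
          length_flatMap_replicate m rest
        have hL : (List.replicate m s).length ≤ i := by simpa using Nat.le_of_not_lt hi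
        rw [List.getElem_append_right hL]
        have hdiv : i / m = (i - m) / m + 1 := by
          conv_lhs => rw [show i = (i - m) + m from by omega]
          rw [Nat.add_div_right _ hm]
        have hhead : i < m + rest.length * m := by
          simpa [List.length_replicate, hlen] using h
        have h'' : (i - m) / m < rest.length := by
          rw [hdiv] at h'; simpa using h'
        have hrec := ih (i - m) (by rw [hlen]; omega) h''
        simp only [List.length_replicate]
        rw [hrec]
        simp only [hdiv, List.getElem_cons_succ]

theorem create_stimulus_labels_eq (labels st : List String) (bs : Int) (hst : st ≠ []) :
    create_stimulus_labels labels st bs = create_stimulus_labels_alt labels st bs := by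
  unfold create_stimulus_labels create_stimulus_labels_alt
  show pvFillA labels.length (st.getD (st.length - 1) "")
        (pvLoopA st 0 (labels.length / st.length) labels.length []) =
      if labels.length / st.length = 0 then
        List.replicate labels.length (st.getD (st.length - 1) "")
      else
        (List.range labels.length).map
          (fun i => st.getD (min (i / (labels.length / st.length)) (st.length - 1)) "")
  set n := labels.length with hn
  set k := st.length with hk
  set sps := n / k with hsps
  have hk0 : 0 < k := List.length_pos_iff.mpr hst
  have hksps : k * sps ≤ n := by
    calc k * sps = n / k * k := by rw [hsps, Nat.mul_comm]
      _ ≤ n := Nat.div_mul_le_self n k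
  have hloop := pvLoopA_eq sps n st 0 [] (by simpa using hksps)
  rw [hloop, List.nil_append, pvFillA_eq, length_flatMap_replicate, ← hk]
  by_cases h0 : sps = 0
  · simp [h0]
  · rw [if_neg h0]
    have hsp : 0 < sps := Nat.pos_of_ne_zero h0
    apply List.ext_getElem
    · rw [List.length_append, length_flatMap_replicate, ← hk, List.length_replicate,
          List.length_map, List.length_range]
      omega
    · intro i hL hR
      simp only [List.length_map, List.length_range] at hR
      rw [List.getElem_map, List.getElem_range]
      by_cases hi : i < k * sps
      · have hidiv : i / sps < k :=
          Nat.div_lt_of_lt_mul (by rw [Nat.mul_comm] at hi; exact hi)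
        rw [List.getElem_append_left (by rw [length_flatMap_replicate, ← hk]; exact hi)]
        rw [getElem_flatMap_replicate sps hsp st i
              (by rw [length_flatMap_replicate, ← hk]; exact hi) (by rw [← hk]; exact hidiv)]
        have hmin : min (i / sps) (k - 1) = i / sps := by omega
        rw [hmin, List.getD_eq_getElem?_getD, List.getElem?_eq_getElem (by rw [← hk]; exact hidiv)]
        rfl
      · have hle : (st.flatMap (fun s => List.replicate sps s)).length ≤ i := by
          rw [length_flatMap_replicate, ← hk]; omega
        rw [List.getElem_append_right hle]
        rw [List.getElem_replicate]
        have hge : k ≤ i / sps := Nat.le_div_iff_mul_le hsp |>.mpr (by omega)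
        have hmin : min (i / sps) (k - 1) = k - 1 := by omega
        rw [hmin]

-- ===== VERDICT (by name: the statement is the Claim_ definition above) =====
theorem create_stimulus_labels_spec : Claim_equal_create_stimulus_labels := by
  intro labels st bs _ hpre
  unfold Spec_create_stimulus_labels
  exact create_stimulus_labels_eq labels st bs hpre
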